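-- pv_equiv track=rewrite | github.com/harukip/DCADE-pattern-alignment | node_op.py | get_all_seq
-- ===== SOURCE A (Python) =====
-- def find_all_indexes(input_str, search_str):
--     l1 = []
--     length = len(input_str)
--     index = 0
--     while index < length:
--         i = input_str.find(search_str, index)
--         if i == -1:
--             return l1
--         l1.append(i)
--         index = i + 1
--     return l1
--
-- def get_all_seq(record_seg, segments):
--     max_len = []
--     all_seqs = []
--     for seg_idx in range(len(record_seg)):
--         max_len.append(0)
--         seqs = []
--         pos = find_all_indexes(segments[record_seg[seg_idx][0]], record_seg[seg_idx][1][1])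
--         for idx in range(len(pos)):
--             if idx+1 != len(pos):
--                 seqs.append(segments[record_seg[seg_idx][0]][pos[idx]:pos[idx+1]])
--                 if len(segments[record_seg[seg_idx][0]][pos[idx]:pos[idx+1]]) > max_len[seg_idx]:
--                     max_len[seg_idx] = len(segments[record_seg[seg_idx][0]][pos[idx]:pos[idx+1]])
--             else:
--                 seqs.append(segments[record_seg[seg_idx][0]][pos[idx]:pos[idx]+max_len[seg_idx]+4])
--         all_seqs.append(seqs)
--     return all_seqs
-- ===== SOURCE B (Python) =====
-- def get_all_seq(record_seg, segments):
--     all_seqs = []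
--     for seg_idx, lst in record_seg:
--         s = segments[seg_idx]
--         sep = lst[1]
--         seqs = []
--         prev = s.find(sep)
--         if prev != -1:
--             max_len = 0
--             while True:
--                 nxt = s.find(sep, prev + 1)
--                 if nxt == -1:
--                     seqs.append(s[prev:prev + max_len + 4])
--                     break
--                 piece = s[prev:nxt]
--                 seqs.append(piece)
--                 if len(piece) > max_len:
--                     max_len = len(piece)
--                 prev = nxt
--         all_seqs.append(seqs)
--     return all_seqs
-- ===== Notes on version B (the rewrite author's own statement) =====
-- stated objective: alternative
-- what changed: B fuses find_all_indexes and the slicing pass into one streaming scan per segment: it never builds the position list and computes each slice once, emitting pieces as successive matches are found.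
-- outside the precondition, e.g. on get_all_seq([(0, ['x', ''])], ['ab']): A returns [['a', 'b']], B returns [['a', 'b', '']]
import Mathlib
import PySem

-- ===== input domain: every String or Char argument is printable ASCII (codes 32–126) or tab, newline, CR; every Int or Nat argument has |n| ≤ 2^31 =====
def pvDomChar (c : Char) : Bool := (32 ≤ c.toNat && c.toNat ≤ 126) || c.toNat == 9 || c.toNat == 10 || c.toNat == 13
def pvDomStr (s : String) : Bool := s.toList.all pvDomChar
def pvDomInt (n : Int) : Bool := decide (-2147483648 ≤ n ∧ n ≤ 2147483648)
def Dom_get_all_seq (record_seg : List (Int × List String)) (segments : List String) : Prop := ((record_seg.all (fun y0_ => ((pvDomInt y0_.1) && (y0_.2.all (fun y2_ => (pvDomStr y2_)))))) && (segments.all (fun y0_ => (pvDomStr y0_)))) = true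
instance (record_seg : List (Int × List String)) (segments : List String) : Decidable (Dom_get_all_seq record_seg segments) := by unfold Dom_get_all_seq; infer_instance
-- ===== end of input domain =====

-- B fuses the index-list build and the slicing pass into one streaming scan per segment (alternative decomposition; each slice is computed once).

-- ===== PORT A =====
-- while loop of find_all_indexes: index strictly increases, measure input.length - index
def find_all_indexes_go (input_str search_str : List Char) (index : Nat) : List Int :=
  if h : index < input_str.length then
    let i := PySem.Chars.findFrom input_str search_str (index : Int) none
    if h2 : i = -1 then []
    else i :: find_all_indexes_go input_str search_str (i.toNat + 1)
  else []
termination_by input_str.length - index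
decreasing_by
  have hspec := PySem.Chars.findFrom_natCast_spec input_str search_str index (Nat.le_of_lt h) h2
  omega

def find_all_indexes (input_str search_str : List Char) : List Int :=
  find_all_indexes_go input_str search_str 0

-- A's inner 'for idx in range(len(pos))' loop, continuation style; m is the current max_len[seg_idx]
def get_all_seq_inner (s : List Char) (pos : List Int) (idx m : Nat) : List (List Char) :=
  if h : idx < pos.length then
    if h2 : idx + 1 ≠ pos.length then
      let sl := PySem.Chars.slice s (some (PySem.List.pyGetD pos (idx : Int) 0)) (some (PySem.List.pyGetD pos ((idx : Int) + 1) 0))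
      sl :: get_all_seq_inner s pos (idx + 1) (if sl.length > m then sl.length else m)
    else
      let p := PySem.List.pyGetD pos (idx : Int) 0
      PySem.Chars.slice s (some p) (some (p + (m : Int) + 4)) :: get_all_seq_inner s pos (idx + 1) m
  else []
termination_by pos.length - idx

def get_all_seq (record_seg : List (Int × List String)) (segments : List String) : List (List String) :=
  record_seg.foldl (fun all_seqs r =>
    let s := (PySem.List.pyGetD segments r.1 "").toList
    let sep := (PySem.List.pyGetD r.2 1 "").toList
    let pos := find_all_indexes s sep
    all_seqs ++ [(get_all_seq_inner s pos 0 0).map String.ofList]) []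

-- ===== PORT B =====
-- the 'while True' scan of B; the fuel argument only makes the loop total (s.length + 1 always suffices, proved below)
def get_all_seq_stream (s sep : List Char) (fuel : Nat) (prev : Int) (max_len : Nat) : List (List Char) :=
  match fuel with
  | 0 => []
  | fuel' + 1 =>
    let nxt := PySem.Chars.findFrom s sep (prev + 1) none
    if nxt = -1 then [PySem.Chars.slice s (some prev) (some (prev + (max_len : Int) + 4))]
    else
      let piece := PySem.Chars.slice s (some prev) (some nxt)
      piece :: get_all_seq_stream s sep fuel' nxt (if piece.length > max_len then piece.length else max_len)

def get_all_seq_alt (record_seg : List (Int × List String)) (segments : List String) : List (List String) :=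
  record_seg.map (fun r =>
    let s := (PySem.List.pyGetD segments r.1 "").toList
    let sep := (PySem.List.pyGetD r.2 1 "").toList
    let prev := PySem.Chars.find s sep
    if prev = -1 then []
    else (get_all_seq_stream s sep (s.length + 1) prev 0).map String.ofList)

-- ===== PRECONDITION & SPEC =====
-- Pre_ requires each segment index in range and each pattern list to have ≥ 2 entries (else Python A raises IndexError);
-- it also excludes the empty separator (on which A still returns): there A's find_all_indexes stops at index < len(s) and
-- misses the empty match at len(s), an accidental loop-bound artefact no caller would rely on, and B's scan sees that match.
def Pre_get_all_seq (record_seg : List (Int × List String)) (segments : List String) : Prop :=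
  ∀ r ∈ record_seg, PySem.Raise.InRange segments.length r.1 ∧ 2 ≤ r.2.length ∧ r.2.getD 1 "" ≠ ""
instance (record_seg : List (Int × List String)) (segments : List String) : Decidable (Pre_get_all_seq record_seg segments) := by unfold Pre_get_all_seq; infer_instance

def pvWitness_get_all_seq : (List (Int × List String)) × List String := ([(0, ["x", "b"])], ["xbyb zb"])

def Spec_get_all_seq (record_seg : List (Int × List String)) (segments : List String) (out : List (List String)) : Prop := out = get_all_seq_alt record_seg segments
instance (record_seg : List (Int × List String)) (segments : List String) (out : List (List String)) : Decidable (Spec_get_all_seq record_seg segments out) := by unfold Spec_get_all_seq; infer_instance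

-- ===== CLAIM (what is proved, stated in full; the proofs are below) =====
def Claim_equal_get_all_seq : Prop := ∀ (record_seg : List (Int × List String)) (segments : List String), Dom_get_all_seq record_seg segments → Pre_get_all_seq record_seg segments → Spec_get_all_seq record_seg segments (get_all_seq record_seg segments)

-- ===== LEMMAS AND PROOFS =====

-- common functional core: adjacent slices between positions, final slice padded by running max + 4
def pvPairs (s : List Char) : List Int → Nat → List (List Char)
  | [], _ => []
  | [p], m => [PySem.Chars.slice s (some p) (some (p + (m : Int) + 4))]
  | p :: q :: rest, m =>
    let sl := PySem.Chars.slice s (some p) (some q)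
    sl :: pvPairs s (q :: rest) (if sl.length > m then sl.length else m)

theorem inner_eq_pvPairs (s : List Char) (pos : List Int) (idx m : Nat) :
    get_all_seq_inner s pos idx m = pvPairs s (pos.drop idx) m := by
  by_cases h : idx < pos.length
  · have hdrop : pos.drop idx = pos[idx] :: pos.drop (idx + 1) := List.drop_eq_getElem_cons h
    by_cases h2 : idx + 1 = pos.length
    · have hnil : pos.drop (idx + 1) = [] := List.drop_of_length_le (by omega)
      rw [get_all_seq_inner, dif_pos h, dif_neg (by omega)]
      simp only [inner_eq_pvPairs s pos (idx + 1)]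
      simp [hdrop, hnil, pvPairs, PySem.List.pyGetD_natCast, h]
    · have h1 : idx + 1 < pos.length := by omega
      have hdrop2 : pos.drop (idx + 1) = pos[idx + 1] :: pos.drop (idx + 2) := List.drop_eq_getElem_cons h1
      rw [get_all_seq_inner, dif_pos h, dif_pos (by omega)]
      simp only [inner_eq_pvPairs s pos (idx + 1)]
      have hc : ((idx : Int) + 1) = ((idx + 1 : Nat) : Int) := by push_cast; ring
      rw [hdrop]
      conv_rhs => rw [hdrop2]
      simp only [pvPairs, hc, PySem.List.pyGetD_natCast]
      rw [← hdrop2]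
      simp [h, h1]
  · rw [get_all_seq_inner, dif_neg h, List.drop_of_length_le (by omega)]
    rfl
termination_by pos.length - idx

theorem drop_ne_nil_of_prefix {sep tail : List Char} (hsep : sep ≠ []) (hpre : sep <+: tail) :
    tail ≠ [] := by
  intro hnil
  exact hsep (List.prefix_nil.mp (hnil ▸ hpre))

theorem stream_eq_pvPairs (s sep : List Char) (hsep : sep ≠ []) :
    ∀ (fuel : Nat) (p : Int) (m : Nat), 0 ≤ p → sep <+: s.drop p.toNat →
    s.length - p.toNat ≤ fuel →
    get_all_seq_stream s sep fuel p m = pvPairs s (p :: find_all_indexes_go s sep (p.toNat + 1)) m := by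
  intro fuel
  induction fuel with
  | zero =>
    intro p m hp hpre hf
    have h1 : s.drop p.toNat ≠ [] := drop_ne_nil_of_prefix hsep hpre
    rw [ne_eq, List.drop_eq_nil_iff] at h1
    omega
  | succ fuel' ih =>
    intro p m hp hpre hf
    have h1 : s.drop p.toNat ≠ [] := drop_ne_nil_of_prefix hsep hpre
    rw [ne_eq, List.drop_eq_nil_iff] at h1
    have hplen : p.toNat < s.length := by omega
    have hend : p.toNat + 1 ≤ s.length := by omega
    have hcast : p + 1 = ((p.toNat + 1 : Nat) : Int) := by omega
    rw [get_all_seq_stream]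
    simp only [hcast, PySem.Chars.findFrom_natCast s sep (p.toNat + 1) hend]
    by_cases hfind : PySem.Chars.find (s.drop (p.toNat + 1)) sep = -1
    · -- no further match: both sides produce the single padded slice
      rw [if_pos hfind, if_pos rfl, find_all_indexes_go]
      by_cases hlt : p.toNat + 1 < s.length
      · rw [dif_pos hlt]
        simp only [PySem.Chars.findFrom_natCast s sep (p.toNat + 1) hend, if_pos hfind]
        simp [pvPairs]
      · rw [dif_neg hlt]
        simp [pvPairs]
    · rw [if_neg hfind]
      have hfnn : 0 ≤ PySem.Chars.find (s.drop (p.toNat + 1)) sep := by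
        have := PySem.Chars.neg_one_le_find (s.drop (p.toNat + 1)) sep
        omega
      set f := PySem.Chars.find (s.drop (p.toNat + 1)) sep with hf'
      have hnxt_ne : ((p.toNat + 1 : Nat) : Int) + f ≠ -1 := by omega
      rw [if_neg hnxt_ne]
      have hspec := (PySem.Chars.find_spec hfnn).1
      rw [List.drop_drop] at hspec
      have htn : (((p.toNat + 1 : Nat) : Int) + f).toNat = p.toNat + 1 + f.toNat := by omega
      have hpre2 : sep <+: s.drop ((((p.toNat + 1 : Nat) : Int) + f).toNat) := by
        rw [htn]; exact hspec
      -- the next position is a real match, so p.toNat + 1 < s.length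
      have hlt : p.toNat + 1 < s.length := by
        have h2 : s.drop (p.toNat + 1 + f.toNat) ≠ [] := drop_ne_nil_of_prefix hsep hspec
        rw [ne_eq, List.drop_eq_nil_iff] at h2
        omega
      rw [ih _ _ (by omega) hpre2 (by omega)]
      conv_rhs => rw [find_all_indexes_go, dif_pos hlt]
      simp only [PySem.Chars.findFrom_natCast s sep (p.toNat + 1) hend, ← hf', if_neg hfind,
        dif_neg hnxt_ne]
      simp [pvPairs]

theorem seg_eq (s sep : List Char) (hsep : sep ≠ []) :
    (get_all_seq_inner s (find_all_indexes s sep) 0 0) =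
    (if PySem.Chars.find s sep = -1 then []
     else get_all_seq_stream s sep (s.length + 1) (PySem.Chars.find s sep) 0) := by
  rw [inner_eq_pvPairs, List.drop_zero, find_all_indexes]
  by_cases hfind : PySem.Chars.find s sep = -1
  · rw [if_pos hfind, find_all_indexes_go]
    by_cases hlen : 0 < s.length
    · rw [dif_pos hlen]
      simp only [Nat.cast_zero, PySem.Chars.findFrom_zero, hfind, reduceDIte]
      rfl
    · rw [dif_neg hlen]; rfl
  · have hnn : 0 ≤ PySem.Chars.find s sep := by
      have := PySem.Chars.neg_one_le_find s sep
      omega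
    have hspec := (PySem.Chars.find_spec hnn).1
    have hne : s.drop (PySem.Chars.find s sep).toNat ≠ [] := drop_ne_nil_of_prefix hsep hspec
    rw [ne_eq, List.drop_eq_nil_iff] at hne
    have hlen : 0 < s.length := by omega
    rw [if_neg hfind, find_all_indexes_go, dif_pos hlen]
    simp only [Nat.cast_zero, PySem.Chars.findFrom_zero, dif_neg hfind]
    rw [stream_eq_pvPairs s sep hsep (s.length + 1) _ 0 hnn hspec (by omega)]

theorem toList_ne_nil_of_ne_empty (t : String) (h : t ≠ "") : t.toList ≠ [] := by
  intro hnil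
  exact h (by rw [← String.ofList_toList (s := t), hnil])

theorem getD_one_eq_pyGetD (xs : List String) : PySem.List.pyGetD xs 1 "" = xs.getD 1 "" := by
  have : (1 : Int) = ((1 : Nat) : Int) := rfl
  rw [this, PySem.List.pyGetD_natCast]

-- ===== VERDICT (by name: the statement is the Claim_ definition above) =====
theorem get_all_seq_spec : Claim_equal_get_all_seq := by
  intro record_seg segments _ hpre
  unfold Spec_get_all_seq get_all_seq get_all_seq_alt
  rw [PySem.List.foldl_append_singleton_eq_map, List.nil_append]
  apply List.map_congr_left
  intro r hr
  obtain ⟨-, -, hsepne⟩ := hpre r hr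
  have hsep : (PySem.List.pyGetD r.2 1 "").toList ≠ [] := by
    apply toList_ne_nil_of_ne_empty
    rw [getD_one_eq_pyGetD]
    exact hsepne
  simp only []
  rw [seg_eq _ _ hsep]
  split <;> simp
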